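-- pv_equiv track=rewrite | github.com/Emll3/project_simul | generate_schedules.py | strategy1
-- ===== SOURCE A (Python) =====
-- HALF_DAYS = {3, 5}  # Thursday (idx 3) and Saturday (idx 5)
--
-- FULL_SLOTS = 32
--
-- NUM_DAYS = 6  # Mon-Sat
--
-- def strategy1(num_urgent: int) -> list[list[int]]:
--     """
--     Urgent slots at end of morning and afternoon blocks, distributed evenly.
--     Returns a 32x6 grid (rows=slots, cols=days).
--     """
--     schedule = [[1] * NUM_DAYS for _ in range(FULL_SLOTS)]
--
--     # Count usable block-ends per day
--     # Morning block: slots 0-15 (all days)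
--     # Afternoon block: slots 16-31 (full days only)
--     # For half-days: only morning block
--     morning_blocks = NUM_DAYS  # 6
--     afternoon_blocks = NUM_DAYS - len(HALF_DAYS)  # 4
--     total_blocks = morning_blocks + afternoon_blocks  # 10
--
--     # Distribute urgent slots as evenly as possible across blocks
--     # Build list of (day, block_end_slot) ordered by priority
--     block_ends = []
--     # Morning ends (slot index 15) for all days
--     for d in range(NUM_DAYS):
--         block_ends.append((d, 15))
--     # Afternoon ends (slot index 31) for full days
--     for d in range(NUM_DAYS):
--         if d not in HALF_DAYS:
--             block_ends.append((d, 31))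
--
--     # Place urgent slots starting from end of each block, cycling through blocks
--     urgent_placed = 0
--     block_idx = 0
--     urgent_per_block = [0] * len(block_ends)
--
--     while urgent_placed < num_urgent:
--         urgent_per_block[block_idx % len(block_ends)] += 1
--         urgent_placed += 1
--         block_idx += 1
--
--     for b_idx, (d, block_end) in enumerate(block_ends):
--         count = urgent_per_block[b_idx]
--         for i in range(count):
--             slot = block_end - i
--             if slot >= 0:
--                 schedule[slot][d] = 2
--
--     return schedule
-- ===== SOURCE B (Python) =====
-- HALF_DAYS = {3, 5}  # Thursday (idx 3) and Saturday (idx 5)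
--
-- FULL_SLOTS = 32
--
-- NUM_DAYS = 6  # Mon-Sat
--
--
-- def strategy1(num_urgent: int) -> list[list[int]]:
--     """Same 32x6 grid, computed in closed form: per-block urgent counts via
--     divmod, then each cell is decided directly from its block's count."""
--     n = max(num_urgent, 0)
--     q, r = divmod(n, 10)
--     # counts per block: morning blocks 0..5 (one per day), afternoon blocks 6..9
--     # for the full days 0,1,2,4 (in that order)
--     cm = [q + (1 if d < r else 0) for d in range(NUM_DAYS)]
--     ca = [q + (1 if NUM_DAYS + i < r else 0) for i in range(4)]
--     return [[2 if (slot <= 15 and slot >= 16 - cm[d])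
--                  or (d != 3 and d != 5 and slot >= 32 - ca[d if d < 3 else d - 1])
--              else 1
--              for d in range(NUM_DAYS)]
--             for slot in range(FULL_SLOTS)]
-- ===== Notes on version B (the rewrite author's own statement) =====
-- stated objective: faster
-- what changed: A places urgent slots one at a time in an O(num_urgent) while-loop and then walks each block's count again to mark cells; B computes each block's count in closed form with divmod(num_urgent,10) and builds the fixed 32x6 grid in one comprehension, deciding each cell directly from its block's count.
import Mathlib
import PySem

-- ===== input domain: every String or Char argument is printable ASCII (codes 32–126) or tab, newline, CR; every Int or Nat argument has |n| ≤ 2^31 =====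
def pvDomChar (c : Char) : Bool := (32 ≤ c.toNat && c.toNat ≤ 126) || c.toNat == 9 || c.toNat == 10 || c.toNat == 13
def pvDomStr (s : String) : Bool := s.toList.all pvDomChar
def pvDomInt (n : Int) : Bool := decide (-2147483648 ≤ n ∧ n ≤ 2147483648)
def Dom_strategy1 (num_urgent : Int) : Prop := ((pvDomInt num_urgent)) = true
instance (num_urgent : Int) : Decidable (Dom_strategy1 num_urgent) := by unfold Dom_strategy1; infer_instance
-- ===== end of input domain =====

-- B replaces A's O(num_urgent) placement loop by a divmod closed form per block
-- and builds the fixed 32x6 grid cell by cell (objective: faster, asymptotic).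

-- ===== PORT A =====
-- A's while-loop: each iteration does urgent_per_block[block_idx % len] += 1 and
-- advances block_idx; urgent_placed counts the iterations, so the loop runs
-- exactly num_urgent.toNat times (fuel = trip count).
def pvLoopA : Nat → Nat → List Int → List Int
  | 0, _, upb => upb
  | fuel + 1, block_idx, upb =>
      pvLoopA fuel (block_idx + 1) (upb.modify (block_idx % upb.length) (· + 1))

-- A's inner marking loop: for i in range(count): slot = block_end - i;
-- if slot >= 0: schedule[slot][d] = 2
def pvMark (block_end : Int) (d : Nat) (count : Nat) (sch : List (List Int)) :
    List (List Int) :=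
  (List.range count).foldl (fun sch (i : Nat) =>
    let slot := block_end - (i : Int)
    if 0 ≤ slot then sch.modify slot.toNat (fun row => row.set d 2) else sch) sch

def strategy1 (num_urgent : Int) : List (List Int) :=
  let schedule : List (List Int) := List.replicate 32 (List.replicate 6 (1 : Int))
  let block_ends : List (Int × Int) :=
    ((List.range 6).map (fun d => ((d : Int), (15 : Int))))
      ++ (((List.range 6).map (fun d => (d : Int))).filter
            (fun d => !(d == 3 || d == 5))).map (fun d => (d, (31 : Int)))
  let upb : List Int := pvLoopA num_urgent.toNat 0 (List.replicate block_ends.length 0)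
  block_ends.zipIdx.foldl
    (fun sch x => pvMark x.1.2 x.1.1.toNat (upb.getD x.2 0).toNat sch) schedule

-- ===== PORT B =====
def strategy1_alt (num_urgent : Int) : List (List Int) :=
  let n := max num_urgent 0
  let q := PySem.Int.floordiv n 10
  let r := PySem.Int.mod n 10
  let cm := (List.range 6).map (fun (d : Nat) => q + (if (d : Int) < r then 1 else 0))
  let ca := (List.range 4).map (fun (i : Nat) => q + (if 6 + (i : Int) < r then 1 else 0))
  (List.range 32).map (fun (slot : Nat) =>
    (List.range 6).map (fun (d : Nat) =>
      if ((slot : Int) ≤ 15 ∧ 16 - cm.getD d 0 ≤ (slot : Int))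
          ∨ (d ≠ 3 ∧ d ≠ 5 ∧ 32 - ca.getD (if d < 3 then d else d - 1) 0 ≤ (slot : Int))
      then (2 : Int) else 1))

-- ===== PRECONDITION & SPEC =====
def Spec_strategy1 (num_urgent : Int) (out : List (List Int)) : Prop := out = strategy1_alt num_urgent
instance (num_urgent : Int) (out : List (List Int)) : Decidable (Spec_strategy1 num_urgent out) := by unfold Spec_strategy1; infer_instance

-- ===== CLAIM (what is proved, stated in full; the proofs are below) =====
def Claim_equal_strategy1 : Prop := ∀ (num_urgent : Int), Dom_strategy1 num_urgent → Spec_strategy1 num_urgent (strategy1 num_urgent)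

-- ===== LEMMAS AND PROOFS =====

theorem pvLoop_general (m : Nat) : ∀ (s : Nat) (upb : List Int), upb.length = 10 →
    ∀ b : Nat, b < 10 → (pvLoopA m s upb).getD b 0
      = upb.getD b 0 + ((List.range m).countP (fun i => (s + i) % 10 == b) : Int) := by
  induction m with
  | zero => intro s upb _ b _; simp [pvLoopA]
  | succ m ih =>
    intro s upb hlen b hb
    have hlen' : (upb.modify (s % upb.length) (· + 1)).length = 10 := by
      simp [hlen]
    rw [pvLoopA, ih (s+1) _ hlen' b hb]
    have hmod : (upb.modify (s % upb.length) (· + 1)).getD b 0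
        = if s % 10 = b then upb.getD b 0 + 1 else upb.getD b 0 := by
      rw [List.getD_eq_getElem?_getD, List.getElem?_modify, hlen]
      have hblt : b < upb.length := by omega
      rw [List.getElem?_eq_getElem hblt]
      rw [List.getD_eq_getElem?_getD, List.getElem?_eq_getElem hblt]
      split <;> rfl
    have hcnt : (List.range (m+1)).countP (fun i => (s + i) % 10 == b)
        = (if s % 10 = b then 1 else 0) + (List.range m).countP (fun i => (s + 1 + i) % 10 == b) := by
      rw [List.range_succ_eq_map, List.countP_cons, List.countP_map]
      have : ((fun i => (s + i) % 10 == b) ∘ Nat.succ) = (fun i => (s + 1 + i) % 10 == b) := by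
        funext i; simp [Function.comp]; omega
      rw [this]
      simp only [Nat.add_zero]
      split <;> split <;> simp_all <;> omega
    rw [hmod, hcnt]
    push_cast
    split <;> ring

theorem pvHits (m b : Nat) (hb : b < 10) :
    (List.range m).countP (fun i => (0 + i) % 10 == b)
      = m / 10 + (if b < m % 10 then 1 else 0) := by
  induction m with
  | zero => simp
  | succ m ih =>
    rw [List.range_succ, List.countP_append, ih]
    simp only [List.countP_cons, List.countP_nil, Nat.zero_add]
    by_cases h : m % 10 = b <;> simp [h] <;> (try split) <;> (try split) <;> omega

def pvShape (g : List (List Int)) : Prop :=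
  g.length = 32 ∧ ∀ s, s < 32 → (g.getD s []).length = 6

def pvCell (g : List (List Int)) (s d : Nat) : Int := (g.getD s []).getD d 0

theorem pvCell_eq (g : List (List Int)) (s d : Nat) :
    pvCell g s d = ((g[s]?.getD [])[d]?).getD 0 := by
  simp [pvCell, List.getD_eq_getElem?_getD]

theorem pvShape_modify (g : List (List Int)) (j dd : Nat) (hg : pvShape g) :
    pvShape (g.modify j (fun row => row.set dd 2)) := by
  obtain ⟨h1, h2⟩ := hg
  refine ⟨by simp [h1], fun s hs => ?_⟩
  rw [List.getD_eq_getElem?_getD, List.getElem?_modify]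
  have hs' : s < g.length := by omega
  rw [List.getElem?_eq_getElem hs']
  have := h2 s hs
  rw [List.getD_eq_getElem?_getD, List.getElem?_eq_getElem hs'] at this
  simp only [Option.getD_some] at this
  split <;> simp [this]

theorem pvShape_pvMark (e : Int) (dd c : Nat) (g : List (List Int)) (hg : pvShape g) :
    pvShape (pvMark e dd c g) := by
  induction c with
  | zero => simpa [pvMark] using hg
  | succ c ih =>
    rw [pvMark, List.range_succ, List.foldl_append, List.foldl_cons, List.foldl_nil]
    rw [show (List.range c).foldl _ g = pvMark e dd c g from rfl]
    dsimp only
    split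
    · exact pvShape_modify _ _ _ ih
    · exact ih

theorem pvCell_modify (g : List (List Int)) (j dd s d : Nat) (hg : pvShape g)
    (hj : j < 32) (hdd : dd < 6) (hs : s < 32) (hd : d < 6) :
    pvCell (g.modify j (fun row => row.set dd 2)) s d
      = if s = j ∧ d = dd then 2 else pvCell g s d := by
  obtain ⟨h1, h2⟩ := hg
  have hs' : s < g.length := by omega
  have hrow := h2 s hs
  rw [List.getD_eq_getElem?_getD, List.getElem?_eq_getElem hs'] at hrow
  simp only [Option.getD_some] at hrow
  rw [pvCell_eq, pvCell_eq, List.getElem?_modify, List.getElem?_eq_getElem hs']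
  simp only [Option.map_eq_map, Option.map_some, Option.getD_some]
  by_cases hsj : s = j
  · subst hsj
    simp only [true_and, if_true]
    rw [List.getElem?_set]
    by_cases hddd : d = dd
    · subst hddd
      simp [hrow, hd]
    · have : dd ≠ d := fun h => hddd h.symm
      simp [this, hddd]
  · have : j ≠ s := fun h => hsj h.symm
    simp [this, hsj]

theorem pvMark_cell (e : Int) (dd c : Nat) (g : List (List Int)) (hg : pvShape g)
    (he0 : 0 ≤ e) (he1 : e ≤ 31) (hdd : dd < 6) (s d : Nat) (hs : s < 32) (hd : d < 6) :
    pvCell (pvMark e dd c g) s d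
      = if d = dd ∧ (s : Int) ≤ e ∧ e - (c : Int) < (s : Int) then 2 else pvCell g s d := by
  induction c with
  | zero =>
    rw [pvMark]
    simp only [List.range_zero, List.foldl_nil]
    have hneg : ¬ (d = dd ∧ (s : Int) ≤ e ∧ e - ((0 : Nat) : Int) < (s : Int)) := by
      rintro ⟨-, h1, h2⟩; push_cast at h2; omega
    rw [if_neg hneg]
  | succ c ih =>
    rw [pvMark, List.range_succ, List.foldl_append, List.foldl_cons, List.foldl_nil]
    rw [show (List.range c).foldl _ g = pvMark e dd c g from rfl]
    dsimp only
    have hsh := pvShape_pvMark e dd c g hg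
    by_cases hec : 0 ≤ e - (c : Int)
    · rw [if_pos hec]
      have hlt : (e - (c : Int)).toNat < 32 := by omega
      rw [pvCell_modify _ _ _ _ _ hsh hlt hdd hs hd, ih]
      by_cases h1 : s = (e - (c : Int)).toNat ∧ d = dd
      · rw [if_pos h1, if_pos]
        obtain ⟨ha, hb⟩ := h1
        subst ha
        refine ⟨hb, by omega, by push_cast; omega⟩
      · rw [if_neg h1]
        congr 1
        apply propext
        constructor
        · rintro ⟨ha, hb, hc⟩
          refine ⟨ha, hb, by push_cast; push_cast at hc; omega⟩
        · rintro ⟨ha, hb, hc⟩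
          refine ⟨ha, hb, ?_⟩
          push_cast at hc ⊢
          rcases eq_or_ne (s : Int) (e - (c : Int)) with h | h
          · exact absurd ⟨by omega, ha⟩ h1
          · omega
    · rw [if_neg hec, ih]
      congr 1
      apply propext
      constructor
      · rintro ⟨ha, hb, hc⟩; refine ⟨ha, hb, by push_cast at hc ⊢; omega⟩
      · rintro ⟨ha, hb, hc⟩; refine ⟨ha, hb, by push_cast at ⊢; omega⟩

theorem pvShape_init : pvShape (List.replicate 32 (List.replicate 6 (1 : Int))) := by
  refine ⟨by simp, fun s hs => ?_⟩
  rw [List.getD_replicate _ hs]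
  simp

theorem pvGrid_ext (g : List (List Int)) (hg : pvShape g) (F : Nat → Nat → Int)
    (h : ∀ s, s < 32 → ∀ d, d < 6 → pvCell g s d = F s d) :
    g = (List.range 32).map (fun s => (List.range 6).map (fun d => F s d)) := by
  apply List.ext_getElem
  · simp [hg.1]
  · intro i h1 h2
    simp only [List.getElem_map, List.getElem_range]
    have hi : i < 32 := by simpa [hg.1] using h1
    have hrow : g[i].length = 6 := by
      have := hg.2 i hi
      rwa [List.getD_eq_getElem?_getD, List.getElem?_eq_getElem h1, Option.getD_some] at this
    apply List.ext_getElem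
    · simp [hrow]
    · intro j hj1 hj2
      have hj : j < 6 := by omega
      have := h i hi j hj
      rw [pvCell_eq, List.getElem?_eq_getElem h1, Option.getD_some,
        List.getElem?_eq_getElem (by omega : j < g[i].length), Option.getD_some] at this
      simpa using this

def pvU (m b : Nat) : Nat := ((pvLoopA m 0 (List.replicate 10 0)).getD b 0).toNat

theorem pvU_eq (m b : Nat) (hb : b < 10) :
    pvU m b = m / 10 + (if b < m % 10 then 1 else 0) := by
  unfold pvU
  rw [pvLoop_general m 0 _ (by simp) b hb, pvHits m b hb, List.getD_replicate _ hb]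
  split <;> omega

theorem main (n : Int) : strategy1 n = strategy1_alt n := by
  have hmax : max n 0 = ((n.toNat : Nat) : Int) := (Int.ofNat_toNat n).symm
  set m := n.toNat with hm
  have hq : PySem.Int.floordiv (max n 0) 10 = ((m / 10 : Nat) : Int) := by
    rw [hmax]; exact_mod_cast PySem.Int.floordiv_natCast m 10
  have hr : PySem.Int.mod (max n 0) 10 = ((m % 10 : Nat) : Int) := by
    rw [hmax]; exact_mod_cast PySem.Int.mod_natCast m 10
  have hA : strategy1 n =
      pvMark 31 4 (pvU m 9) (pvMark 31 2 (pvU m 8) (pvMark 31 1 (pvU m 7)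
        (pvMark 31 0 (pvU m 6) (pvMark 15 5 (pvU m 5) (pvMark 15 4 (pvU m 4)
          (pvMark 15 3 (pvU m 3) (pvMark 15 2 (pvU m 2) (pvMark 15 1 (pvU m 1)
            (pvMark 15 0 (pvU m 0)
              (List.replicate 32 (List.replicate 6 (1 : Int)))))))))))) := rfl
  have hB : strategy1_alt n =
      (List.range 32).map (fun (slot : Nat) =>
        (List.range 6).map (fun (d : Nat) =>
          if ((slot : Int) ≤ 15 ∧
                16 - ((List.range 6).map (fun (d : Nat) => PySem.Int.floordiv (max n 0) 10
                        + (if (d : Int) < PySem.Int.mod (max n 0) 10 then 1 else 0))).getD d 0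
                  ≤ (slot : Int))
              ∨ (d ≠ 3 ∧ d ≠ 5 ∧
                  32 - ((List.range 4).map (fun (i : Nat) => PySem.Int.floordiv (max n 0) 10
                          + (if 6 + (i : Int) < PySem.Int.mod (max n 0) 10 then 1 else 0))).getD
                        (if d < 3 then d else d - 1) 0 ≤ (slot : Int))
          then (2 : Int) else 1)) := rfl
  have t0 := pvShape_init
  have t1 := pvShape_pvMark 15 0 (pvU m 0) _ t0
  have t2 := pvShape_pvMark 15 1 (pvU m 1) _ t1
  have t3 := pvShape_pvMark 15 2 (pvU m 2) _ t2
  have t4 := pvShape_pvMark 15 3 (pvU m 3) _ t3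
  have t5 := pvShape_pvMark 15 4 (pvU m 4) _ t4
  have t6 := pvShape_pvMark 15 5 (pvU m 5) _ t5
  have t7 := pvShape_pvMark 31 0 (pvU m 6) _ t6
  have t8 := pvShape_pvMark 31 1 (pvU m 7) _ t7
  have t9 := pvShape_pvMark 31 2 (pvU m 8) _ t8
  have t10 := pvShape_pvMark 31 4 (pvU m 9) _ t9
  rw [hA, hB]
  refine pvGrid_ext _ t10 _ ?_
  intro s hs d hd
  rw [pvMark_cell 31 4 (pvU m 9) _ t9 (by norm_num) (by norm_num) (by norm_num) s d hs hd,
      pvMark_cell 31 2 (pvU m 8) _ t8 (by norm_num) (by norm_num) (by norm_num) s d hs hd,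
      pvMark_cell 31 1 (pvU m 7) _ t7 (by norm_num) (by norm_num) (by norm_num) s d hs hd,
      pvMark_cell 31 0 (pvU m 6) _ t6 (by norm_num) (by norm_num) (by norm_num) s d hs hd,
      pvMark_cell 15 5 (pvU m 5) _ t5 (by norm_num) (by norm_num) (by norm_num) s d hs hd,
      pvMark_cell 15 4 (pvU m 4) _ t4 (by norm_num) (by norm_num) (by norm_num) s d hs hd,
      pvMark_cell 15 3 (pvU m 3) _ t3 (by norm_num) (by norm_num) (by norm_num) s d hs hd,
      pvMark_cell 15 2 (pvU m 2) _ t2 (by norm_num) (by norm_num) (by norm_num) s d hs hd,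
      pvMark_cell 15 1 (pvU m 1) _ t1 (by norm_num) (by norm_num) (by norm_num) s d hs hd,
      pvMark_cell 15 0 (pvU m 0) _ t0 (by norm_num) (by norm_num) (by norm_num) s d hs hd]
  have hinit : pvCell (List.replicate 32 (List.replicate 6 (1 : Int))) s d = 1 := by
    unfold pvCell
    rw [List.getD_replicate _ hs, List.getD_replicate _ hd]
  rw [hinit, hq, hr,
      pvU_eq m 0 (by norm_num), pvU_eq m 1 (by norm_num), pvU_eq m 2 (by norm_num),
      pvU_eq m 3 (by norm_num), pvU_eq m 4 (by norm_num), pvU_eq m 5 (by norm_num),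
      pvU_eq m 6 (by norm_num), pvU_eq m 7 (by norm_num), pvU_eq m 8 (by norm_num),
      pvU_eq m 9 (by norm_num)]
  interval_cases d <;>
    norm_num [List.range_succ, List.getD_cons_zero, List.getD_cons_succ] <;>
    split_ifs <;> omega

-- ===== VERDICT (by name: the statement is the Claim_ definition above) =====
theorem strategy1_spec : Claim_equal_strategy1 := by
  intro n _
  unfold Spec_strategy1
  exact main n
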